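-- pv_equiv track=rewrite | github.com/Robin-Rounthwaite/reference-based-cactus-aligner | test_cigar_coordinates.py | lastz_to_sam_cig
-- ===== SOURCE A (Python) =====
-- def lastz_to_sam_cig(lastz_cig_str):
--     brkdwn = lastz_cig_str.split()
--     lets = list()
--     nums = list()
--     for i in range(len(brkdwn)):
--         if i%2 == 0:
--             #it's a letter:
--             lets.append(brkdwn[i])
--         else:
--             #it's a num:
--             nums.append(brkdwn[i])
--     orig_cig = ""
--     for i in range(len(lets)):
--         orig_cig += nums[i] + lets[i]
--
--     return orig_cig
-- ===== SOURCE B (Python) =====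
-- def lastz_to_sam_cig(lastz_cig_str):
--     brkdwn = lastz_cig_str.split()
--     out = []
--     for i in range(0, len(brkdwn), 2):
--         out.append(brkdwn[i + 1] + brkdwn[i])
--     return "".join(out)
-- ===== Notes on version B (the rewrite author's own statement) =====
-- stated objective: simpler
-- what changed: B drops A's parity-partitioned intermediate lists (lets/nums): it walks the token list once in strides of two, swapping each number/letter pair in place, and joins the pieces at the end.
import Mathlib
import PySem

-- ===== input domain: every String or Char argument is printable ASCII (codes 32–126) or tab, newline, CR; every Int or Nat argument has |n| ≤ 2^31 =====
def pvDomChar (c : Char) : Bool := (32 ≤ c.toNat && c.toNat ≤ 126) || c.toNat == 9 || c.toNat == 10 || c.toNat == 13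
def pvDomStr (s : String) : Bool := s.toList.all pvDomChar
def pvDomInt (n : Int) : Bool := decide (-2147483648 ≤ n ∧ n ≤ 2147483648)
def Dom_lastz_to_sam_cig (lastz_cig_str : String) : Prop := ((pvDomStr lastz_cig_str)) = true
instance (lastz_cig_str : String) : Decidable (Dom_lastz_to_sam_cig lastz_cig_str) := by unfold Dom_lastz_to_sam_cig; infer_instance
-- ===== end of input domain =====

-- B replaces A's parity-partitioned intermediate lists (lets/nums) by a single stride-2 walk
-- over the token list that swaps each number/letter pair in place and joins the pieces (simpler).


-- ===== PORT A =====
def lastz_to_sam_cig (lastz_cig_str : String) : String :=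
  let brkdwn := PySem.Str.split₀ lastz_cig_str
  let st := (PySem.List.pyRange 0 (brkdwn.length : Int) 1).foldl
      (fun (st : List String × List String) i =>
        if PySem.Int.mod i 2 == 0 then (st.1 ++ [PySem.List.pyGetD brkdwn i ""], st.2)
        else (st.1, st.2 ++ [PySem.List.pyGetD brkdwn i ""])) ([], [])
  (PySem.List.pyRange 0 (st.1.length : Int) 1).foldl
      (fun acc i => acc ++ PySem.List.pyGetD st.2 i "" ++ PySem.List.pyGetD st.1 i "") ""

-- ===== PORT B =====
def lastz_to_sam_cig_alt (lastz_cig_str : String) : String :=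
  let brkdwn := PySem.Str.split₀ lastz_cig_str
  let out := (PySem.List.pyRange 0 (brkdwn.length : Int) 2).foldl
      (fun (acc : List String) i =>
        acc ++ [PySem.List.pyGetD brkdwn (i + 1) "" ++ PySem.List.pyGetD brkdwn i ""]) []
  PySem.Str.join "" out

-- ===== PRECONDITION & SPEC =====
-- Pre_ excludes exactly the inputs whose whitespace-split token count is odd: there Python A
-- raises IndexError (nums is one shorter than lets), and Python B raises IndexError too.
def Pre_lastz_to_sam_cig (lastz_cig_str : String) : Prop :=
  (PySem.Str.split₀ lastz_cig_str).length % 2 = 0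
instance (lastz_cig_str : String) : Decidable (Pre_lastz_to_sam_cig lastz_cig_str) := by
  unfold Pre_lastz_to_sam_cig; infer_instance
def pvWitness_lastz_to_sam_cig : String := "M 3 I 2"
def Spec_lastz_to_sam_cig (lastz_cig_str : String) (out : String) : Prop := out = lastz_to_sam_cig_alt lastz_cig_str
instance (lastz_cig_str : String) (out : String) : Decidable (Spec_lastz_to_sam_cig lastz_cig_str out) := by unfold Spec_lastz_to_sam_cig; infer_instance

-- ===== CLAIM (what is proved, stated in full; the proofs are below) =====
def Claim_equal_lastz_to_sam_cig : Prop := ∀ (lastz_cig_str : String), Dom_lastz_to_sam_cig lastz_cig_str → Pre_lastz_to_sam_cig lastz_cig_str → Spec_lastz_to_sam_cig lastz_cig_str (lastz_to_sam_cig lastz_cig_str)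

-- ===== LEMMAS AND PROOFS =====

-- A's loop body at a Nat index, with the Python mod/indexing primitives discharged.
theorem stepcast (bs : List String) (st : List String × List String) (j : Nat) :
    (if PySem.Int.mod (↑j) 2 == 0 then (st.1 ++ [PySem.List.pyGetD bs (↑j) ""], st.2)
     else (st.1, st.2 ++ [PySem.List.pyGetD bs (↑j) ""]))
    = (if j % 2 == 0 then (st.1 ++ [bs.getD j ""], st.2) else (st.1, st.2 ++ [bs.getD j ""])) := by
  simp [PySem.List.pyGetD_natCast]
  split_ifs with h1 h2 <;> first | rfl | (exfalso; omega)

-- A's single loop with a parity branch over a pair state splits into two filtered lists.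
theorem foldl_pair_split {α β : Type} (p : α → Bool) (f g : α → β) (l : List α)
    (a b : List β) :
    l.foldl (fun st x => if p x then (st.1 ++ [f x], st.2) else (st.1, st.2 ++ [g x])) (a, b)
      = (a ++ (l.filter p).map f, b ++ (l.filter (fun x => !p x)).map g) := by
  induction l generalizing a b with
  | nil => simp
  | cons x t ih => by_cases hp : p x = true <;> simp [hp, ih]

-- The even-index positions of range (2*m) are the 2*k, the odd ones the 2*k+1.
theorem filter_even_range (m : Nat) :
    (List.range (2 * m)).filter (fun j => j % 2 == 0) = (List.range m).map (fun k => 2 * k) := by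
  induction m with
  | zero => simp
  | succ m ih =>
      have h : 2 * (m + 1) = (2 * m + 1) + 1 := by omega
      rw [h, List.range_succ, List.range_succ, List.range_succ]
      simp [List.filter_append, ih, Nat.mul_mod_right]

theorem filter_odd_range (m : Nat) :
    (List.range (2 * m)).filter (fun j => !(j % 2 == 0)) = (List.range m).map (fun k => 2 * k + 1) := by
  induction m with
  | zero => simp
  | succ m ih =>
      have h : 2 * (m + 1) = (2 * m + 1) + 1 := by omega
      rw [h, List.range_succ, List.range_succ, List.range_succ]
      simp [List.filter_append, ih, Nat.mul_mod_right]

-- A's first loop over the token list equals the two parity-filtered lists (lets, nums).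
theorem partA (bs : List String) (m : Nat) (hm : bs.length = 2 * m) :
    (PySem.List.pyRange 0 (bs.length : Int) 1).foldl
      (fun (st : List String × List String) i =>
        if PySem.Int.mod i 2 == 0 then (st.1 ++ [PySem.List.pyGetD bs i ""], st.2)
        else (st.1, st.2 ++ [PySem.List.pyGetD bs i ""])) ([], [])
    = ((List.range m).map (fun k => bs.getD (2 * k) ""),
       (List.range m).map (fun k => bs.getD (2 * k + 1) "")) := by
  rw [hm, PySem.List.pyRange_zero_natCast, List.foldl_map]
  have he : ∀ (st : List String × List String) (j : Nat),
      (if PySem.Int.mod (↑j) 2 == 0 then (st.1 ++ [PySem.List.pyGetD bs (↑j) ""], st.2)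
       else (st.1, st.2 ++ [PySem.List.pyGetD bs (↑j) ""]))
      = (if j % 2 == 0 then (st.1 ++ [bs.getD j ""], st.2) else (st.1, st.2 ++ [bs.getD j ""])) :=
    stepcast bs
  simp only [he]
  rw [foldl_pair_split (fun j => j % 2 == 0) (fun j => bs.getD j "") (fun j => bs.getD j "")]
  rw [filter_even_range, filter_odd_range]
  simp [List.map_map, Function.comp_def]

theorem strJoin_empty_nil : PySem.Str.join "" [] = "" := by
  apply String.toList_inj.mp
  simp [PySem.Str.toList_join, PySem.Chars.join_nil]

theorem strJoin_empty_cons (x : String) (xs : List String) :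
    PySem.Str.join "" (x :: xs) = x ++ PySem.Str.join "" xs := by
  apply String.toList_inj.mp
  cases xs with
  | nil => simp [PySem.Str.toList_join]
  | cons y rest => simp [PySem.Str.toList_join, PySem.Chars.join_cons_cons]

-- An accumulate-by-append string loop is the join of the mapped list.
theorem foldl_str_append {α : Type} (l : List α) (f : α → String) (a : String) :
    l.foldl (fun acc x => acc ++ f x) a = a ++ PySem.Str.join "" (l.map f) := by
  induction l generalizing a with
  | nil => simp [strJoin_empty_nil]
  | cons x t ih => simp [ih, strJoin_empty_cons, String.append_assoc]

-- A's second loop over (lets, nums) equals the join of the swapped pairs.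
theorem partA2 (bs : List String) (m : Nat) :
    (PySem.List.pyRange 0 (((List.range m).map (fun k => bs.getD (2 * k) "")).length : Int) 1).foldl
      (fun acc i => acc ++ PySem.List.pyGetD ((List.range m).map (fun k => bs.getD (2 * k + 1) "")) i ""
                        ++ PySem.List.pyGetD ((List.range m).map (fun k => bs.getD (2 * k) "")) i "") ""
    = PySem.Str.join "" ((List.range m).map (fun j => bs.getD (2 * j + 1) "" ++ bs.getD (2 * j) "")) := by
  rw [List.length_map, List.length_range, PySem.List.pyRange_zero_natCast, List.foldl_map]
  simp only [PySem.List.pyGetD_natCast, String.append_assoc]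
  rw [foldl_str_append]
  have he : ("" : String) ++ PySem.Str.join "" ((List.range m).map (fun j =>
      ((List.range m).map (fun k => bs.getD (2 * k + 1) "")).getD j "" ++
      ((List.range m).map (fun k => bs.getD (2 * k) "")).getD j "")) = PySem.Str.join "" ((List.range m).map (fun j =>
      ((List.range m).map (fun k => bs.getD (2 * k + 1) "")).getD j "" ++
      ((List.range m).map (fun k => bs.getD (2 * k) "")).getD j "")) := by
    apply String.toList_inj.mp; simp
  rw [he]
  apply congrArg
  apply List.map_congr_left
  intro j hj
  rw [List.mem_range] at hj
  rw [PySem.List.getD_map_range _ _ _ _ hj, PySem.List.getD_map_range _ _ _ _ hj]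

-- B's stride-2 loop equals the same join.
theorem partB (bs : List String) (m : Nat) (hm : bs.length = 2 * m) :
    PySem.Str.join "" ((PySem.List.pyRange 0 (bs.length : Int) 2).foldl
      (fun (acc : List String) i =>
        acc ++ [PySem.List.pyGetD bs (i + 1) "" ++ PySem.List.pyGetD bs i ""]) [])
    = PySem.Str.join "" ((List.range m).map (fun j => bs.getD (2 * j + 1) "" ++ bs.getD (2 * j) "")) := by
  rw [hm, PySem.List.pyRange_of_pos 0 ((2*m : Nat) : Int) (by norm_num)]
  have hcount : (if (0:Int) < ((2*m : Nat) : Int) then ((((2*m : Nat) : Int) - 0 + 2 - 1) / 2).toNat else 0) = m := by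
    split_ifs with h <;> omega
  rw [hcount, List.foldl_map, PySem.List.foldl_append_singleton_eq_map]
  simp only [List.nil_append]
  congr 1
  apply List.map_congr_left
  intro j hj
  have h0 : (0 + 2 * (j : Int)) = ((2*j : Nat) : Int) := by push_cast; ring
  have h1 : (0 + 2 * (j : Int) + 1) = ((2*j+1 : Nat) : Int) := by push_cast; ring
  rw [h1, h0, PySem.List.pyGetD_natCast, PySem.List.pyGetD_natCast]

-- ===== VERDICT (by name: the statement is the Claim_ definition above) =====
theorem lastz_to_sam_cig_spec : Claim_equal_lastz_to_sam_cig := by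
  intro s _ hpre
  unfold Pre_lastz_to_sam_cig at hpre
  unfold Spec_lastz_to_sam_cig lastz_to_sam_cig lastz_to_sam_cig_alt
  obtain ⟨m, hm⟩ : ∃ m, (PySem.Str.split₀ s).length = 2 * m :=
    ⟨(PySem.Str.split₀ s).length / 2, by omega⟩
  show (PySem.List.pyRange 0 ((((PySem.List.pyRange 0 ((PySem.Str.split₀ s).length : Int) 1).foldl
        (fun (st : List String × List String) i =>
          if PySem.Int.mod i 2 == 0 then (st.1 ++ [PySem.List.pyGetD (PySem.Str.split₀ s) i ""], st.2)
          else (st.1, st.2 ++ [PySem.List.pyGetD (PySem.Str.split₀ s) i ""])) ([], [])).1.length : Int)) 1).foldl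
      (fun acc i => acc ++ PySem.List.pyGetD ((PySem.List.pyRange 0 ((PySem.Str.split₀ s).length : Int) 1).foldl
        (fun (st : List String × List String) i =>
          if PySem.Int.mod i 2 == 0 then (st.1 ++ [PySem.List.pyGetD (PySem.Str.split₀ s) i ""], st.2)
          else (st.1, st.2 ++ [PySem.List.pyGetD (PySem.Str.split₀ s) i ""])) ([], [])).2 i ""
          ++ PySem.List.pyGetD ((PySem.List.pyRange 0 ((PySem.Str.split₀ s).length : Int) 1).foldl
        (fun (st : List String × List String) i =>
          if PySem.Int.mod i 2 == 0 then (st.1 ++ [PySem.List.pyGetD (PySem.Str.split₀ s) i ""], st.2)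
          else (st.1, st.2 ++ [PySem.List.pyGetD (PySem.Str.split₀ s) i ""])) ([], [])).1 i "") ""
    = PySem.Str.join "" ((PySem.List.pyRange 0 ((PySem.Str.split₀ s).length : Int) 2).foldl
        (fun (acc : List String) i =>
          acc ++ [PySem.List.pyGetD (PySem.Str.split₀ s) (i + 1) "" ++ PySem.List.pyGetD (PySem.Str.split₀ s) i ""]) [])
  rw [partA _ _ hm]
  exact (partA2 (PySem.Str.split₀ s) m).trans (partB _ _ hm).symm
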